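-- pv_equiv track=rewrite | github.com/bee-hive/VentRL | utils/extractSamples.py | clusterEthnicities
-- ===== SOURCE A (Python) =====
-- def clusterEthnicities(ethList):
--     simplified = []
--     for i in ethList:
--         if 'WHITE' in i: simplified.append('WHITE')
--         elif 'BLACK' in i: simplified.append('BLACK')
--         elif 'HISPANIC' in i: simplified.append('HISPANIC')
--         elif 'ASIAN' in i: simplified.append('ASIAN')
--         else: simplified.append('OTHER')
--     return simplified
-- ===== SOURCE B (Python) =====
-- def clusterEthnicities(ethList):
--     # Staged overwrite: start everything at 'OTHER', then sweep the whole list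
--     # once per category in reverse priority; a later sweep overwrites earlier
--     # ones, so the highest-priority matching category wins.
--     out = ['OTHER'] * len(ethList)
--     for sub in ['ASIAN', 'HISPANIC', 'BLACK', 'WHITE']:
--         out = [sub if sub in s else o for o, s in zip(out, ethList)]
--     return out
-- ===== Notes on version B (the rewrite author's own statement) =====
-- stated objective: alternative
-- what changed: Instead of classifying each element with a first-match cascade, B initialises all results to 'OTHER' and makes one full overwrite pass per category in reverse priority order, so the last (highest-priority) matching pass wins.
import Mathlib
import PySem

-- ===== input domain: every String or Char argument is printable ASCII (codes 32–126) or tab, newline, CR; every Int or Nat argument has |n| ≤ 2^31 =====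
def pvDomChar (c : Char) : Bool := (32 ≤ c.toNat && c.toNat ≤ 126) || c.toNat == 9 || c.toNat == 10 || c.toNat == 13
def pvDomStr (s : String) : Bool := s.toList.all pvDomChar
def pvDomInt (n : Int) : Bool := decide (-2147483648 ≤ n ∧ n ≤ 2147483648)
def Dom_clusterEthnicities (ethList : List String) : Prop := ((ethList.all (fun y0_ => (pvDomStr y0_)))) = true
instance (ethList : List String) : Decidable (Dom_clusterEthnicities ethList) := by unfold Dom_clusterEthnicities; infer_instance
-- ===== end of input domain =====

-- ===== PORT A =====
-- B replaces the per-element if-elif cascade by staged whole-list overwrite passes,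
-- one per category in reverse priority order (last write wins); alternative, same cost.
def clusterEthnicities (ethList : List String) : List String :=
  ethList.foldl (fun simplified i =>
    if PySem.Str.isIn "WHITE" i then simplified ++ ["WHITE"]
    else if PySem.Str.isIn "BLACK" i then simplified ++ ["BLACK"]
    else if PySem.Str.isIn "HISPANIC" i then simplified ++ ["HISPANIC"]
    else if PySem.Str.isIn "ASIAN" i then simplified ++ ["ASIAN"]
    else simplified ++ ["OTHER"]) []

-- ===== PORT B =====
-- one overwrite pass: out = [sub if sub in s else o for o, s in zip(out, ethList)]
def ethPass (sub : String) (out : List String) (ethList : List String) : List String :=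
  (out.zip ethList).map (fun p => if PySem.Str.isIn sub p.2 then sub else p.1)

def clusterEthnicities_alt (ethList : List String) : List String :=
  ["ASIAN", "HISPANIC", "BLACK", "WHITE"].foldl
    (fun out sub => ethPass sub out ethList)
    (List.replicate ethList.length "OTHER")

-- ===== PRECONDITION & SPEC =====
def Spec_clusterEthnicities (ethList : List String) (out : List String) : Prop := out = clusterEthnicities_alt ethList
instance (ethList : List String) (out : List String) : Decidable (Spec_clusterEthnicities ethList out) := by unfold Spec_clusterEthnicities; infer_instance

-- ===== CLAIM (what is proved, stated in full; the proofs are below) =====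
def Claim_equal_clusterEthnicities : Prop := ∀ (ethList : List String), Dom_clusterEthnicities ethList → Spec_clusterEthnicities ethList (clusterEthnicities ethList)

-- ===== LEMMAS AND PROOFS =====
-- a pass distributes over cons
theorem ethPass_cons (sub a x : String) (out xs : List String) :
    ethPass sub (a :: out) (x :: xs)
      = (if PySem.Str.isIn sub x then sub else a) :: ethPass sub out xs := by
  simp [ethPass]

-- B computes the cascade value element-wise
theorem alt_cons (x : String) (xs : List String) :
    clusterEthnicities_alt (x :: xs)
      = (if PySem.Str.isIn "WHITE" x then "WHITE"
         else if PySem.Str.isIn "BLACK" x then "BLACK"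
         else if PySem.Str.isIn "HISPANIC" x then "HISPANIC"
         else if PySem.Str.isIn "ASIAN" x then "ASIAN"
         else "OTHER") :: clusterEthnicities_alt xs := by
  simp only [clusterEthnicities_alt, List.foldl, List.length_cons, List.replicate_succ,
    ethPass_cons]

-- A's foldl-with-append loop against B, with an arbitrary accumulator
theorem eth_fold (ethList : List String) (acc : List String) :
    ethList.foldl (fun simplified i =>
      if PySem.Str.isIn "WHITE" i then simplified ++ ["WHITE"]
      else if PySem.Str.isIn "BLACK" i then simplified ++ ["BLACK"]
      else if PySem.Str.isIn "HISPANIC" i then simplified ++ ["HISPANIC"]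
      else if PySem.Str.isIn "ASIAN" i then simplified ++ ["ASIAN"]
      else simplified ++ ["OTHER"]) acc
    = acc ++ clusterEthnicities_alt ethList := by
  induction ethList generalizing acc with
  | nil => simp [clusterEthnicities_alt, ethPass]
  | cons x xs ih =>
    simp only [List.foldl]
    rw [ih, alt_cons]
    by_cases h1 : PySem.Str.isIn "WHITE" x <;>
    by_cases h2 : PySem.Str.isIn "BLACK" x <;>
    by_cases h3 : PySem.Str.isIn "HISPANIC" x <;>
    by_cases h4 : PySem.Str.isIn "ASIAN" x <;>
    simp_all

-- ===== VERDICT (by name: the statement is the Claim_ definition above) =====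
theorem clusterEthnicities_spec : Claim_equal_clusterEthnicities := by
  intro ethList _
  show clusterEthnicities ethList = clusterEthnicities_alt ethList
  unfold clusterEthnicities
  simpa using eth_fold ethList []
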